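-- pv_equiv track=rewrite | github.com/KirillNN/Python_Codewars | 7kyu/Binary Representation of an Integer.py | show_bits
-- ===== SOURCE A (Python) =====
-- def show_bits(n):
--     if n >= 0:
--         x = bin(n)[2:].rjust(32, '0')
--     else:
--         n = abs(n) - 1
--         n = bin(n)[2:]
--         x = ''.join(['1' if x == '0' else '0' for x in n]).rjust(32, '1')
--     return list(map(int, x))
-- ===== SOURCE B (Python) =====
-- def show_bits(n):
--     if n >= 0:
--         w = max(32, n.bit_length())
--     else:
--         w = max(32, (-n - 1).bit_length())
--     v = n & ((1 << w) - 1)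
--     return [(v >> i) & 1 for i in range(w - 1, -1, -1)]
-- ===== Notes on version B (the rewrite author's own statement) =====
-- stated objective: idiomatic
-- what changed: Replaces the binary-string building, character inversion and rjust padding with pure integer arithmetic: compute the output width, mask n to its two's-complement value, and extract each bit by shift-and-mask.
import Mathlib
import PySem

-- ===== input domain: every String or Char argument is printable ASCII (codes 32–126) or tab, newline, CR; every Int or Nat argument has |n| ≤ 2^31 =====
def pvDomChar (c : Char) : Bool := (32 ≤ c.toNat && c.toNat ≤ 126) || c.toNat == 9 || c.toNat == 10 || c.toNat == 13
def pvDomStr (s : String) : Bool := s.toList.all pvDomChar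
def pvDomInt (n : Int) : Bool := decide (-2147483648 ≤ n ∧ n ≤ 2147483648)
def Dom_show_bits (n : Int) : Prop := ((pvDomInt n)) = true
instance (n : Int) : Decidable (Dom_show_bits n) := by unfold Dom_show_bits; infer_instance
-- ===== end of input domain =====

-- B drops A's string building/inversion/rjust and computes each bit of the masked two's-complement value by shift-and-mask (objective: idiomatic).

-- ===== PORT A =====
-- bin(m)[2:] for a nonzero Nat, as Python's bin builds it (MSB first)
def pvBinCore (m : Nat) : List Char :=
  if m = 0 then []
  else pvBinCore (m / 2) ++ [if m % 2 = 1 then '1' else '0']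

-- bin(m)[2:] (Python gives "0" for 0)
def pvBinStr (m : Nat) : List Char :=
  if m = 0 then ['0'] else pvBinCore m

-- int(c) for a digit character
def pvCharToInt (c : Char) : Int := (c.toNat : Int) - 48

def show_bits (n : Int) : List Int :=
  if n ≥ 0 then
    let x := List.replicate (32 - (pvBinStr n.toNat).length) '0' ++ pvBinStr n.toNat
    x.map pvCharToInt
  else
    let m := n.natAbs - 1
    let s := (pvBinStr m).map (fun c => if c = '0' then '1' else '0')
    let x := List.replicate (32 - s.length) '1' ++ s
    x.map pvCharToInt

-- ===== PORT B =====
-- Python int.bit_length() of a Nat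
def pvBitLen (m : Nat) : Nat :=
  if m = 0 then 0 else pvBitLen (m / 2) + 1

def show_bits_alt (n : Int) : List Int :=
  let w := if n ≥ 0 then max 32 (pvBitLen n.toNat) else max 32 (pvBitLen ((-n - 1).toNat))
  let v := (n % (2 ^ w)).toNat          -- n & ((1 << w) - 1): Python's & of n with the all-ones mask
  ((List.range w).reverse).map (fun i => (((v >>> i) &&& 1 : Nat) : Int))

-- ===== PRECONDITION & SPEC =====
def Spec_show_bits (n : Int) (out : List Int) : Prop := out = show_bits_alt n
instance (n : Int) (out : List Int) : Decidable (Spec_show_bits n out) := by unfold Spec_show_bits; infer_instance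

-- ===== CLAIM (what is proved, stated in full; the proofs are below) =====
def Claim_equal_show_bits : Prop := ∀ (n : Int), Dom_show_bits n → Spec_show_bits n (show_bits n)

-- ===== LEMMAS AND PROOFS =====

-- bits of v, LSB first, k of them
def pvG (v k : Nat) : List Nat :=
  match k with
  | 0 => []
  | k + 1 => v % 2 :: pvG (v / 2) k

-- Nat-level mirror of pvBinCore
def pvBin' (m : Nat) : List Nat :=
  if m = 0 then []
  else pvBin' (m / 2) ++ [m % 2]

def pvBitChar (b : Nat) : Char := if b = 1 then '1' else '0'

theorem pvBinCore_eq (m : Nat) : pvBinCore m = (pvBin' m).map pvBitChar := by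
  induction m using Nat.strong_induction_on with
  | _ m ih =>
    rw [pvBinCore, pvBin']
    by_cases h : m = 0
    · simp [h]
    · have := ih (m / 2) (Nat.div_lt_self (Nat.pos_of_ne_zero h) (by norm_num))
      simp [h, this, pvBitChar]

theorem pvG_zero (k : Nat) : pvG 0 k = List.replicate k 0 := by
  induction k with
  | zero => rfl
  | succ k ih => simp [pvG, ih, List.replicate_succ]

theorem pvG_bin (k : Nat) : ∀ v, v < 2 ^ k →
    pvG v k = (pvBin' v).reverse ++ List.replicate (k - (pvBin' v).length) 0 := by
  induction k with
  | zero =>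
    intro v hv
    interval_cases v
    simp [pvG, pvBin']
  | succ k ih =>
    intro v hv
    by_cases h : v = 0
    · subst h; rw [pvBin']; simp [pvG_zero]
    · rw [pvG, pvBin']
      have hv2 : v / 2 < 2 ^ k := by
        have h2 : 2 ^ (k + 1) = 2 ^ k * 2 := by ring
        omega
      rw [ih (v / 2) hv2]
      simp [h, Nat.succ_sub_succ]

theorem pvG_compl (k : Nat) : ∀ m, m < 2 ^ k →
    pvG (2 ^ k - 1 - m) k = (pvG m k).map (fun b => 1 - b) := by
  induction k with
  | zero => intro m hm; rfl
  | succ k ih =>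
    intro m hm
    have h2 : 2 ^ (k + 1) = 2 ^ k * 2 := by ring
    have hm2 : m / 2 < 2 ^ k := by omega
    have hmod : (2 ^ (k + 1) - 1 - m) % 2 = 1 - m % 2 := by omega
    have hdiv : (2 ^ (k + 1) - 1 - m) / 2 = 2 ^ k - 1 - m / 2 := by omega
    rw [pvG, pvG, hmod, hdiv, ih (m / 2) hm2]
    simp

theorem pvBin'_mem {m b : Nat} (h : b ∈ pvBin' m) : b < 2 := by
  induction m using Nat.strong_induction_on with
  | _ m ih =>
    rw [pvBin'] at h
    by_cases h0 : m = 0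
    · simp [h0] at h
    · simp [h0] at h
      rcases h with h | h
      · exact ih (m / 2) (Nat.div_lt_self (Nat.pos_of_ne_zero h0) (by norm_num)) h
      · omega

theorem pvRange_g (k : Nat) : ∀ v,
    (List.range k).reverse.map (fun i => (v >>> i) &&& 1) = (pvG v k).reverse := by
  induction k with
  | zero => intro v; rfl
  | succ k ih =>
    intro v
    rw [List.range_succ_eq_map]
    have hstep : ∀ i : Nat, ((v >>> (i + 1)) &&& 1) = ((v / 2) >>> i) &&& 1 := by
      intro i
      simp [Nat.shiftRight_eq_div_pow, Nat.pow_succ, Nat.div_div_eq_div_mul, Nat.mul_comm]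
    simp only [List.reverse_cons, List.map_append, pvG, List.reverse_cons]
    congr 1
    · rw [← ih (v / 2), List.map_reverse, List.map_reverse, List.map_map]
      congr 1
      apply List.map_congr_left
      intro i _
      simpa using hstep i
    · simp [Nat.shiftRight_eq_div_pow, Nat.and_one_is_mod]

theorem pvRange_g_int (k v : Nat) :
    (List.range k).reverse.map (fun i => (((v >>> i) &&& 1 : Nat) : Int))
      = ((pvG v k).reverse).map Int.ofNat := by
  rw [← pvRange_g k v, List.map_map]
  rfl

theorem pvBitLen_le (k : Nat) : ∀ v, v < 2 ^ k → pvBitLen v ≤ k := by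
  induction k with
  | zero => intro v hv; interval_cases v; simp [pvBitLen]
  | succ k ih =>
    intro v hv
    rw [pvBitLen]
    by_cases h : v = 0
    · simp [h]
    · have hv2 : v / 2 < 2 ^ k := by
        have h2 : 2 ^ (k + 1) = 2 ^ k * 2 := by ring
        omega
      simp [h]
      exact ih (v / 2) hv2

theorem pvMap_int_bits {l : List Nat} (hl : ∀ b ∈ l, b < 2) :
    (l.map pvBitChar).map pvCharToInt = l.map Int.ofNat := by
  rw [List.map_map]
  apply List.map_congr_left
  intro b hb
  have := hl b hb
  interval_cases b <;> decide

theorem pvMap_int_inv {l : List Nat} (hl : ∀ b ∈ l, b < 2) :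
    ((l.map pvBitChar).map (fun c => if c = '0' then '1' else '0')).map pvCharToInt
      = (l.map (fun b => 1 - b)).map Int.ofNat := by
  simp only [List.map_map]
  apply List.map_congr_left
  intro b hb
  have := hl b hb
  interval_cases b <;> decide

-- ===== VERDICT (by name: the statement is the Claim_ definition above) =====
theorem show_bits_spec : Claim_equal_show_bits := by
  intro n hdom
  unfold Spec_show_bits
  have hd : -2147483648 ≤ n ∧ n ≤ 2147483648 := by
    simpa [Dom_show_bits, pvDomInt] using hdom
  have hp32i : (2:Int) ^ 32 = 4294967296 := by norm_num
  by_cases hn : n ≥ 0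
  · have hvlt : n.toNat < 2 ^ 32 := by omega
    have hw : max 32 (pvBitLen n.toNat) = 32 := Nat.max_eq_left (pvBitLen_le 32 _ hvlt)
    have hemod : n % (2 ^ 32) = n := by
      rw [hp32i]; exact Int.emod_eq_of_lt hn (by omega)
    have hB : show_bits_alt n = ((pvG n.toNat 32).reverse).map Int.ofNat := by
      simp only [show_bits_alt, if_pos hn, hw, hemod]
      exact pvRange_g_int 32 n.toNat
    by_cases h0 : n = 0
    · subst h0; rw [hB]; decide
    · have hv0 : n.toNat ≠ 0 := by omega
      rw [hB, pvG_bin 32 n.toNat hvlt]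
      simp only [show_bits, if_pos hn, pvBinStr, if_neg hv0, pvBinCore_eq]
      rw [List.map_append, List.map_replicate,
          pvMap_int_bits (fun b hb => pvBin'_mem hb), List.length_map,
          List.reverse_append, List.reverse_replicate, List.reverse_reverse,
          List.map_append, List.map_replicate]
      rfl
  · have hneg : n < 0 := by omega
    set m : Nat := n.natAbs - 1 with hm
    have hm' : (-n - 1).toNat = m := by omega
    have hmlt : m < 2 ^ 32 := by omega
    have hw : max 32 (pvBitLen ((-n - 1).toNat)) = 32 := by
      rw [hm']; exact Nat.max_eq_left (pvBitLen_le 32 _ hmlt)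
    have hemod : n % (2 ^ 32) = n + 4294967296 := by
      rw [hp32i]; omega
    have hv : (n % (2 ^ 32)).toNat = 2 ^ 32 - 1 - m := by
      rw [hemod]; omega
    have hB : show_bits_alt n
        = ((pvG m 32).map (fun b => 1 - b)).reverse.map Int.ofNat := by
      simp only [show_bits_alt, if_neg hn, hw, hv]
      rw [pvRange_g_int 32 (2 ^ 32 - 1 - m), pvG_compl 32 m hmlt]
    by_cases h1 : n = -1
    · subst h1; rw [hB]; decide
    · have hm0 : m ≠ 0 := by omega
      have hc1 : pvCharToInt '1' = 1 := by decide
      rw [hB, pvG_bin 32 m hmlt]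
      simp only [show_bits, if_neg hn, ← hm, pvBinStr, if_neg hm0, pvBinCore_eq]
      rw [List.map_append, List.map_replicate,
          pvMap_int_inv (fun b hb => pvBin'_mem hb), List.length_map, List.length_map]
      simp [List.map_append, List.map_replicate, List.reverse_append,
            List.reverse_replicate, List.map_reverse, List.reverse_reverse, hc1]
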